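-- pv_equiv track=rewrite | github.com/James-HoneyBadger/Time_Warp_II | core/features/ide_features.py | format_import_graph
-- ===== SOURCE A (Python) =====
-- def format_import_graph(graph: dict[str, list[str]]) -> str:
--     """Format an import graph as a readable tree string."""
--     if not graph:
--         return "No imports found."
--
--     lines = ["═══ IMPORT DEPENDENCY GRAPH ═══", ""]
--
--     # Find root nodes (files not imported by anyone)
--     all_imported = set()
--     for deps in graph.values():
--         all_imported.update(deps)
--     roots = [f for f in graph if f not in all_imported]
--     if not roots:
--         roots = list(graph.keys())[:1]
--
--     visited: set[str] = set()
--
--     def _tree(name: str, prefix: str = "", is_last: bool = True) -> None: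
--         connector = "└── " if is_last else "├── "
--         lines.append(f"{prefix}{connector}{name}")
--         visited.add(name)
--
--         deps = graph.get(name, [])
--         child_prefix = prefix + ("    " if is_last else "│   ")
--         for i, dep in enumerate(deps):
--             if dep in visited:
--                 is_last_child = i == len(deps) - 1
--                 conn = "└── " if is_last_child else "├── "
--                 lines.append(f"{child_prefix}{conn}{dep} (circular)")
--             else:
--                 _tree(dep, child_prefix, i == len(deps) - 1)
--
--     for i, root in enumerate(roots):
--         if i > 0:
--             lines.append("")
--         _tree(root, "", i == len(roots) - 1)
--
--     lines.append("")
--     lines.append(f"Files: {len(graph)}  |  Edges: {sum(len(d) for d in graph.values())}")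
--     return "\n".join(lines)
-- ===== SOURCE B (Python) =====
-- def format_import_graph(graph: dict[str, list[str]]) -> str:
--     """Format an import graph as a readable tree string (iterative DFS with an explicit stack)."""
--     if not graph:
--         return "No imports found."
--
--     lines = ["═══ IMPORT DEPENDENCY GRAPH ═══", ""]
--
--     imported = {dep for deps in graph.values() for dep in deps}
--     roots = [f for f in graph if f not in imported]
--     if not roots:
--         roots = list(graph.keys())[:1]
--
--     visited: set[str] = set()
--
--     for i, root in enumerate(roots):
--         if i > 0:
--             lines.append("")
--         # frame = (name, prefix, is_last, force): roots are force-expanded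
--         stack = [(root, "", i == len(roots) - 1, True)]
--         while stack:
--             name, prefix, is_last, force = stack.pop()
--             conn = "└── " if is_last else "├── "
--             if not force and name in visited:
--                 lines.append(f"{prefix}{conn}{name} (circular)")
--                 continue
--             lines.append(f"{prefix}{conn}{name}")
--             visited.add(name)
--             deps = graph.get(name, [])
--             child_prefix = prefix + ("    " if is_last else "│   ")
--             for j in range(len(deps) - 1, -1, -1):
--                 stack.append((deps[j], child_prefix, j == len(deps) - 1, False))
--
--     lines.append("")
--     lines.append(f"Files: {len(graph)}  |  Edges: {sum(len(d) for d in graph.values())}")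
--     return "\n".join(lines)
-- ===== Notes on version B (the rewrite author's own statement) =====
-- stated objective: alternative
-- what changed: The recursive _tree walk (call stack + nested closure) is replaced by an iterative depth-first traversal over an explicit stack of (name, prefix, is_last, force) frames, pushing dependencies in reversed order and deferring the circular check to pop time.
import Mathlib
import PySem

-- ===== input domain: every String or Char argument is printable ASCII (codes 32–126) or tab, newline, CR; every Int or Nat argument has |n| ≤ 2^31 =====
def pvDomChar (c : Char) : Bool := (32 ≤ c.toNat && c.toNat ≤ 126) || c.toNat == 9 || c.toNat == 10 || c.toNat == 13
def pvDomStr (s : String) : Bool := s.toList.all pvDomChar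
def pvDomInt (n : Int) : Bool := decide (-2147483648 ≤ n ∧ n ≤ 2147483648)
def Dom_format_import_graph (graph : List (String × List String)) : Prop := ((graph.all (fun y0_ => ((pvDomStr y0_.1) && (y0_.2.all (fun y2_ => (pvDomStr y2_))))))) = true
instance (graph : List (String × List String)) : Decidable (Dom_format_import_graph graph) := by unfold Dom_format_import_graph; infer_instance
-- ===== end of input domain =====

-- B replaces A's recursive tree walk by an explicit stack-based iterative DFS (alternative decomposition, same preorder output).

-- ===== PORT A =====
-- A's nested recursive `_tree` (the inner `for dep` loop is `pvChildrenA`); the `fuel`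
-- parameter is only a totality guard — the recursion genuinely terminates because each
-- call adds an unvisited name to `visited`, and the ports are run with fuel larger than
-- the number of names, which the proofs show is never exhausted.
mutual
def pvTreeA (g : PySem.Dict String (List String)) (fuel : Nat) (name pre : String) (isLast : Bool) (visited : PySem.Set String) : List String × PySem.Set String :=
  match fuel with
  | 0 => ([], visited)  -- fuel guard, unreachable
  | f + 1 =>
    let line := pre ++ (if isLast then "└── " else "├── ") ++ name
    let v' := PySem.Set.add visited name
    let deps := PySem.Dict.getD g name []
    let childPrefix := pre ++ (if isLast then "    " else "│   ")
    let r := pvChildrenA g f deps childPrefix v'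
    (line :: r.1, r.2)
termination_by (fuel, 0)

def pvChildrenA (g : PySem.Dict String (List String)) (fuel : Nat) (deps : List String) (childPrefix : String) (visited : PySem.Set String) : List String × PySem.Set String :=
  match deps with
  | [] => ([], visited)
  | dep :: rest =>
    -- `i == len(deps) - 1` holds exactly for the final element, i.e. when `rest` is empty
    if PySem.Set.contains visited dep then
      let line := childPrefix ++ (if rest.isEmpty then "└── " else "├── ") ++ dep ++ " (circular)"
      let r := pvChildrenA g fuel rest childPrefix visited
      (line :: r.1, r.2)
    else
      let r1 := pvTreeA g fuel dep childPrefix rest.isEmpty visited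
      let r2 := pvChildrenA g fuel rest childPrefix r1.2
      (r1.1 ++ r2.1, r2.2)
termination_by (fuel, deps.length + 1)
end

-- `for i, root in enumerate(roots): if i > 0: lines.append(""); _tree(root, "", i == len(roots)-1)`
def pvRootsA (g : PySem.Dict String (List String)) (fuel : Nat) (roots : List String) (isFirst : Bool) (visited : PySem.Set String) : List String × PySem.Set String :=
  match roots with
  | [] => ([], visited)
  | r :: rest =>
    let t := pvTreeA g fuel r "" rest.isEmpty visited
    let r2 := pvRootsA g fuel rest false t.2
    ((if isFirst then [] else [""]) ++ t.1 ++ r2.1, r2.2)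

def format_import_graph (graph : List (String × List String)) : String :=
  let d := PySem.Dict.ofList graph
  if d.size = 0 then "No imports found."
  else
    let allImported := d.values.foldl (fun s deps => PySem.Set.update s deps) PySem.Set.empty
    let roots0 := d.keys.filter (fun f => !(PySem.Set.contains allImported f))
    let roots := if roots0.isEmpty then d.keys.take 1 else roots0
    let fuel := d.size + (d.values.map List.length).sum + 1
    let body := pvRootsA d fuel roots true PySem.Set.empty
    let lines := ["═══ IMPORT DEPENDENCY GRAPH ═══", ""] ++ body.1 ++
      ["", "Files: " ++ PySem.Int.toStr (d.size : Int) ++ "  |  Edges: " ++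
        PySem.Int.toStr (((d.values.map List.length).sum : Nat) : Int)]
    PySem.Str.join "\n" lines

-- ===== PORT B =====
-- B's explicit stack: frames are (name, prefix, is_last, force); python pushes the deps in
-- reversed order onto the end of the list and pops from the end, so the stack is modelled
-- top-first: the new frames are prepended in original order.  `fuel` is a totality guard,
-- spent only when a node is expanded (each expansion marks a new visited name).
def pvMkFrames (deps : List String) (childPrefix : String) : List (String × String × Bool × Bool) :=
  match deps with
  | [] => []
  | d :: rest => (d, childPrefix, rest.isEmpty, false) :: pvMkFrames rest childPrefix

def pvRunB (g : PySem.Dict String (List String)) (fuel : Nat) (stack : List (String × String × Bool × Bool)) (visited : PySem.Set String) : List String × PySem.Set String :=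
  match stack with
  | [] => ([], visited)
  | (name, pre, isLast, force) :: rest =>
    if !force && PySem.Set.contains visited name then
      let line := pre ++ (if isLast then "└── " else "├── ") ++ name ++ " (circular)"
      let r := pvRunB g fuel rest visited
      (line :: r.1, r.2)
    else
      match fuel with
      | 0 => ([], visited)  -- fuel guard, unreachable
      | f + 1 =>
        let line := pre ++ (if isLast then "└── " else "├── ") ++ name
        let v' := PySem.Set.add visited name
        let deps := PySem.Dict.getD g name []
        let childPrefix := pre ++ (if isLast then "    " else "│   ")
        let r := pvRunB g f (pvMkFrames deps childPrefix ++ rest) v'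
        (line :: r.1, r.2)
termination_by (fuel, stack.length)

def pvRootsB (g : PySem.Dict String (List String)) (fuel : Nat) (roots : List String) (isFirst : Bool) (visited : PySem.Set String) : List String × PySem.Set String :=
  match roots with
  | [] => ([], visited)
  | r :: rest =>
    let t := pvRunB g fuel [(r, "", rest.isEmpty, true)] visited
    let r2 := pvRootsB g fuel rest false t.2
    ((if isFirst then [] else [""]) ++ t.1 ++ r2.1, r2.2)

def format_import_graph_alt (graph : List (String × List String)) : String :=
  let d := PySem.Dict.ofList graph
  if d.size = 0 then "No imports found."
  else
    let imported := PySem.Set.ofList d.values.flatten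
    let roots0 := d.keys.filter (fun f => !(PySem.Set.contains imported f))
    let roots := if roots0.isEmpty then d.keys.take 1 else roots0
    let fuel := d.size + (d.values.map List.length).sum + 1
    let body := pvRootsB d fuel roots true PySem.Set.empty
    let lines := ["═══ IMPORT DEPENDENCY GRAPH ═══", ""] ++ body.1 ++
      ["", "Files: " ++ PySem.Int.toStr (d.size : Int) ++ "  |  Edges: " ++
        PySem.Int.toStr (((d.values.map List.length).sum : Nat) : Int)]
    PySem.Str.join "\n" lines

-- ===== PRECONDITION & SPEC =====
def Spec_format_import_graph (graph : List (String × List String)) (out : String) : Prop := out = format_import_graph_alt graph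
instance (graph : List (String × List String)) (out : String) : Decidable (Spec_format_import_graph graph out) := by unfold Spec_format_import_graph; infer_instance

-- ===== CLAIM (what is proved, stated in full; the proofs are below) =====
def Claim_equal_format_import_graph : Prop := ∀ (graph : List (String × List String)), Dom_format_import_graph graph → Spec_format_import_graph graph (format_import_graph graph)

-- ===== LEMMAS AND PROOFS =====

-- `pvU pool v` counts the pool entries not yet visited: the termination measure of the walk.
def pvU (pool : List String) (v : PySem.Set String) : Nat :=
  (pool.filter (fun x => !(PySem.Set.contains v x))).length

theorem pv_filter_mono (l : List String) (p q : String → Bool) (h : ∀ x ∈ l, p x → q x) :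
    (l.filter p).length ≤ (l.filter q).length := by
  induction l with
  | nil => simp
  | cons a t ih =>
    have iht := ih (fun x hx hp => h x (List.mem_cons_of_mem _ hx) hp)
    by_cases hp : p a
    · have hq := h a (List.mem_cons_self) hp
      simp [hp, hq]; omega
    · by_cases hq : q a <;> simp [hp, hq] <;> omega

theorem pv_filter_lt (l : List String) (p q : String → Bool) (h : ∀ x ∈ l, p x → q x)
    (a : String) (ha : a ∈ l) (hqa : q a) (hpa : ¬ p a) :
    (l.filter p).length < (l.filter q).length := by
  induction l with
  | nil => simp at ha
  | cons b t ih =>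
    have ht : ∀ x ∈ t, p x → q x := fun x hx hp => h x (List.mem_cons_of_mem _ hx) hp
    have hmono := pv_filter_mono t p q ht
    rcases List.mem_cons.mp ha with rfl | hat
    · simp [hpa, hqa]; omega
    · have := ih ht hat
      by_cases hp : p b
      · have hq := h b (List.mem_cons_self) hp
        simp [hp, hq]; omega
      · by_cases hq : q b <;> simp [hp, hq] <;> omega

theorem pv_contains_add (v : PySem.Set String) (n x : String) :
    PySem.Set.contains (PySem.Set.add v n) x = (PySem.Set.contains v x || x == n) := by
  simp only [PySem.Set.add, PySem.Set.contains]
  split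
  · rename_i hc
    by_cases hx : x = n
    · subst hx; simp_all
    · simp [hx]
  · simp [List.contains_append, beq_eq_decide]

theorem pv_contains_update (v : PySem.Set String) (xs : List String) (x : String) :
    PySem.Set.contains (PySem.Set.update v xs) x = (PySem.Set.contains v x || xs.contains x) := by
  induction xs generalizing v with
  | nil => simp [PySem.Set.update]
  | cons a t ih =>
    have h : PySem.Set.update v (a :: t) = PySem.Set.update (PySem.Set.add v a) t := rfl
    rw [h, ih, pv_contains_add]
    by_cases hx : x = a <;> simp [hx, beq_eq_decide]

theorem pvU_mono (pool : List String) (v w : PySem.Set String)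
    (h : ∀ x, PySem.Set.contains v x → PySem.Set.contains w x) : pvU pool w ≤ pvU pool v := by
  refine pv_filter_mono pool _ _ (fun x _ hp => ?_)
  by_cases hv : PySem.Set.contains v x
  · have hw := h x hv
    simp [PySem.Set.contains] at hw
    simp [hw] at hp
  · simpa using hv

theorem pvU_add_lt (pool : List String) (v : PySem.Set String) (n : String)
    (hn : n ∈ pool) (hv : ¬ PySem.Set.contains v n = true) :
    pvU pool (PySem.Set.add v n) < pvU pool v := by
  refine pv_filter_lt pool _ _ (fun x _ hp => ?_) n hn
    (by simpa [PySem.Set.contains] using hv) (by simp [pv_contains_add])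
  by_cases hvx : PySem.Set.contains v x
  · exfalso
    have hw : PySem.Set.contains (PySem.Set.add v n) x = true := by
      simp [pv_contains_add]
      exact Or.inl (by simpa using hvx)
    simp only [PySem.Set.contains, List.contains_iff_mem] at hw
    simp [hw] at hp
  · simpa using hvx

theorem pvU_update_le (pool : List String) (v : PySem.Set String) (xs : List String) :
    pvU pool (PySem.Set.update v xs) ≤ pvU pool v := by
  refine pvU_mono pool v _ (fun x hv => ?_)
  simp [pv_contains_update]
  exact Or.inl (by simpa using hv)

theorem pv_update_update (v : PySem.Set String) (a b : List String) :
    PySem.Set.update (PySem.Set.update v a) b = PySem.Set.update v (a ++ b) := by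
  simp [PySem.Set.update, List.foldl_append]

theorem pv_lex_le_lt {a a' b b' : Nat} (h1 : a' ≤ a) (h2 : b' < b) :
    Prod.Lex (· < ·) (· < ·) (a', b') (a, b) := by
  rcases Nat.lt_or_ge a' a with h | h
  · exact Prod.Lex.left _ _ h
  · have : a' = a := le_antisymm h1 h
    subst this
    exact Prod.Lex.right _ h2

-- Canonical (fuel-free) reference walk.  It returns the PREORDER LINES together with the
-- LIST OF NAMES IT ADDED to `visited` (so the final visited set is `update v added`).
mutual
def pvTreeC (g : PySem.Dict String (List String)) (pool : List String) (name pre : String) (isLast : Bool) (v : PySem.Set String) : List String × List String :=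
  let line := pre ++ (if isLast then "└── " else "├── ") ++ name
  if h : name ∈ pool ∧ ¬ PySem.Set.contains v name = true then
    let deps := PySem.Dict.getD g name []
    let childPrefix := pre ++ (if isLast then "    " else "│   ")
    let r := pvChildrenC g pool deps childPrefix (PySem.Set.add v name)
    (line :: r.1, name :: r.2)
  else ([line], [name])  -- unreachable in the proofs (guard always holds there)
termination_by (pvU pool v, 0)
decreasing_by
  exact Prod.Lex.left _ _ (pvU_add_lt pool v name h.1 h.2)

def pvChildrenC (g : PySem.Dict String (List String)) (pool : List String) (deps : List String) (childPrefix : String) (v : PySem.Set String) : List String × List String :=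
  match deps with
  | [] => ([], [])
  | d :: rest =>
    if PySem.Set.contains v d then
      let line := childPrefix ++ (if rest.isEmpty then "└── " else "├── ") ++ d ++ " (circular)"
      let r := pvChildrenC g pool rest childPrefix v
      (line :: r.1, r.2)
    else if hd : d ∈ pool then
      let r1 := pvTreeC g pool d childPrefix rest.isEmpty v
      let r2 := pvChildrenC g pool rest childPrefix (PySem.Set.update v r1.2)
      (r1.1 ++ r2.1, r1.2 ++ r2.2)
    else pvChildrenC g pool rest childPrefix v  -- unreachable (deps ⊆ pool in the proofs)
termination_by (pvU pool v, deps.length + 1)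
decreasing_by
  · exact pv_lex_le_lt (le_refl _) (by simp)
  · exact pv_lex_le_lt (le_refl _) (by simp)
  · exact pv_lex_le_lt (pvU_update_le _ _ _) (by simp)
  · exact pv_lex_le_lt (le_refl _) (by simp)
end

-- Canonical run of a whole stack of frames.
def pvFlat (g : PySem.Dict String (List String)) (pool : List String) (stack : List (String × String × Bool × Bool)) (v : PySem.Set String) : List String × PySem.Set String :=
  match stack with
  | [] => ([], v)
  | (name, pre, isLast, force) :: rest =>
    if !force && PySem.Set.contains v name then
      let line := pre ++ (if isLast then "└── " else "├── ") ++ name ++ " (circular)"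
      let r := pvFlat g pool rest v
      (line :: r.1, r.2)
    else
      let r1 := pvTreeC g pool name pre isLast v
      let r2 := pvFlat g pool rest (PySem.Set.update v r1.2)
      (r1.1 ++ r2.1, r2.2)
termination_by (pvU pool v, stack.length)
decreasing_by
  · exact pv_lex_le_lt (le_refl _) (by simp)
  · exact pv_lex_le_lt (pvU_update_le _ _ _) (by simp)

def pvRootsC (g : PySem.Dict String (List String)) (pool : List String) (roots : List String) (isFirst : Bool) (v : PySem.Set String) : List String × PySem.Set String :=
  match roots with
  | [] => ([], v)
  | r :: rest =>
    let t := pvTreeC g pool r "" rest.isEmpty v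
    let r2 := pvRootsC g pool rest false (PySem.Set.update v t.2)
    ((if isFirst then [] else [""]) ++ t.1 ++ r2.1, r2.2)


theorem pvU_le_len (pool : List String) (v : PySem.Set String) : pvU pool v ≤ pool.length :=
  List.length_filter_le _ _

theorem pv_getD_sub (g : PySem.Dict String (List String)) (n x : String)
    (hx : x ∈ PySem.Dict.getD g n []) : x ∈ g.values.flatten := by
  rw [PySem.Dict.getD, PySem.Dict.get?] at hx
  rcases hfind : List.find? (fun p => p.1 == n) g.items with _ | p
  · simp [hfind] at hx
  · simp [hfind] at hx
    refine List.mem_flatten.mpr ⟨p.2, ?_, hx⟩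
    exact List.mem_map.mpr ⟨p, List.mem_of_find?_eq_some hfind, rfl⟩

-- every name the canonical walk adds to `visited` is the start name or an imported name
theorem pvGB (g : PySem.Dict String (List String)) (pool : List String) :
    (∀ (n p : String) (l : Bool) (v : PySem.Set String),
      ∀ x ∈ (pvTreeC g pool n p l v).2, x = n ∨ x ∈ g.values.flatten) ∧
    (∀ (deps : List String) (cp : String) (v : PySem.Set String),
      ∀ x ∈ (pvChildrenC g pool deps cp v).2, x ∈ deps ∨ x ∈ g.values.flatten) := by
  refine pvTreeC.mutual_induct g pool
    (fun n p l v => ∀ x ∈ (pvTreeC g pool n p l v).2, x = n ∨ x ∈ g.values.flatten)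
    (fun deps cp v => ∀ x ∈ (pvChildrenC g pool deps cp v).2, x ∈ deps ∨ x ∈ g.values.flatten)
    ?_ ?_ ?_ ?_ ?_ ?_
  · intro name pre isLast v h _deps _cp ih x hx
    rw [pvTreeC.eq_def] at hx
    simp only [h, if_pos, dif_pos] at hx
    rcases List.mem_cons.mp hx with rfl | hx2
    · exact Or.inl rfl
    · rcases ih x hx2 with hd | hf
      · exact Or.inr (pv_getD_sub g name x hd)
      · exact Or.inr hf
  · intro name pre isLast v h x hx
    rw [pvTreeC.eq_def] at hx
    simp only [h, dif_neg] at hx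
    simp at hx
    exact Or.inl hx
  · intro cp v x hx
    rw [pvChildrenC.eq_def] at hx
    simp at hx
  · intro cp v dep rest hc ih x hx
    rw [pvChildrenC.eq_def] at hx
    simp only [hc, if_pos] at hx
    rcases ih x hx with h1 | h2
    · exact Or.inl (List.mem_cons_of_mem _ h1)
    · exact Or.inr h2
  · intro cp v dep rest hc hd _r1 ih1 ih2 x hx
    rw [pvChildrenC.eq_def] at hx
    simp only [hc, hd, if_neg, dif_pos, Bool.not_eq_true] at hx
    rcases List.mem_append.mp hx with h1 | h2
    · rcases ih1 x h1 with rfl | hf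
      · exact Or.inl (List.mem_cons_self)
      · exact Or.inr hf
    · rcases ih2 x h2 with h1 | hf
      · exact Or.inl (List.mem_cons_of_mem _ h1)
      · exact Or.inr hf
  · intro cp v dep rest hc hd ih x hx
    rw [pvChildrenC.eq_def] at hx
    simp only [hc, hd, if_neg, dif_neg, Bool.not_eq_true] at hx
    rcases ih x hx with h1 | h2
    · exact Or.inl (List.mem_cons_of_mem _ h1)
    · exact Or.inr h2

theorem pvGB_tree (g : PySem.Dict String (List String)) (pool : List String)
    (n p : String) (l : Bool) (v : PySem.Set String) :
    ∀ x ∈ (pvTreeC g pool n p l v).2, x = n ∨ x ∈ g.values.flatten :=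
  (pvGB g pool).1 n p l v

-- A's fuelled recursion equals the canonical walk when the fuel is large enough
theorem pvA1 (g : PySem.Dict String (List String)) (pool : List String)
    (hpool : ∀ n : String, ∀ x ∈ PySem.Dict.getD g n [], x ∈ pool) (f : Nat) :
    (∀ (n p : String) (l : Bool) (v : PySem.Set String),
        n ∈ pool → ¬ PySem.Set.contains v n = true → pvU pool v + 1 ≤ f →
        pvTreeA g f n p l v =
          ((pvTreeC g pool n p l v).1, PySem.Set.update v (pvTreeC g pool n p l v).2)) ∧
    (∀ (deps : List String) (cp : String) (v : PySem.Set String),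
        (∀ x ∈ deps, x ∈ pool) → pvU pool v + 1 ≤ f →
        pvChildrenA g f deps cp v =
          ((pvChildrenC g pool deps cp v).1, PySem.Set.update v (pvChildrenC g pool deps cp v).2)) := by
  induction f with
  | zero => exact ⟨fun _ _ _ _ _ _ h => absurd h (by omega), fun _ _ _ _ h => absurd h (by omega)⟩
  | succ f ih =>
    have htree : ∀ (n p : String) (l : Bool) (v : PySem.Set String),
        n ∈ pool → ¬ PySem.Set.contains v n = true → pvU pool v + 1 ≤ f + 1 →
        pvTreeA g (f + 1) n p l v =
          ((pvTreeC g pool n p l v).1, PySem.Set.update v (pvTreeC g pool n p l v).2) := by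
      intro n p l v hn hv hf
      have hlt := pvU_add_lt pool v n hn hv
      have hch := ih.2 (PySem.Dict.getD g n []) (p ++ (if l then "    " else "│   "))
        (PySem.Set.add v n) (fun x hx => hpool n x hx) (by omega)
      rw [pvTreeA, pvTreeC]
      simp only [dif_pos (And.intro hn hv)]
      rw [hch]
      rfl
    refine ⟨htree, ?_⟩
    intro deps cp v
    induction deps generalizing v with
    | nil => intro _ _; rw [pvChildrenA, pvChildrenC]; rfl
    | cons d rest ihd =>
      intro hdeps hf
      have hdp : d ∈ pool := hdeps d List.mem_cons_self
      have hrest : ∀ x ∈ rest, x ∈ pool := fun x hx => hdeps x (List.mem_cons_of_mem _ hx)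
      by_cases hc : PySem.Set.contains v d = true
      · rw [pvChildrenA, pvChildrenC]
        simp only [hc, if_pos]
        rw [ihd v hrest hf]
      · rw [pvChildrenA, pvChildrenC]
        simp only [hc, if_neg, dif_pos hdp, Bool.not_eq_true]
        rw [htree d cp rest.isEmpty v hdp hc hf]
        have hle := pvU_update_le pool v (pvTreeC g pool d cp rest.isEmpty v).2
        rw [ihd _ hrest
          (by exact (by omega : pvU pool (PySem.Set.update v (pvTreeC g pool d cp rest.isEmpty v).2) + 1 ≤ f + 1))]
        simp only [pv_update_update]

-- running the unforced frames made from a dependency list equals the canonical children walk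
theorem pvLapp (g : PySem.Dict String (List String)) (pool : List String)
    (deps : List String) (cp : String) (rest : List (String × String × Bool × Bool))
    (v : PySem.Set String) (hdeps : ∀ x ∈ deps, x ∈ pool) :
    pvFlat g pool (pvMkFrames deps cp ++ rest) v =
      ((pvChildrenC g pool deps cp v).1 ++
        (pvFlat g pool rest (PySem.Set.update v (pvChildrenC g pool deps cp v).2)).1,
       (pvFlat g pool rest (PySem.Set.update v (pvChildrenC g pool deps cp v).2)).2) := by
  induction deps generalizing v with
  | nil => rw [pvMkFrames, pvChildrenC]; rfl
  | cons d rest' ihd =>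
    have hdp : d ∈ pool := hdeps d List.mem_cons_self
    have hrest : ∀ x ∈ rest', x ∈ pool := fun x hx => hdeps x (List.mem_cons_of_mem _ hx)
    by_cases hc : PySem.Set.contains v d = true
    · rw [pvMkFrames, List.cons_append, pvFlat, pvChildrenC]
      simp only [hc, if_pos, Bool.not_false, Bool.true_and]
      rw [ihd v hrest]
      simp [List.cons_append]
    · rw [pvMkFrames, List.cons_append, pvFlat, pvChildrenC]
      simp only [hc, Bool.not_false, Bool.true_and, Bool.false_eq_true, if_false, dif_pos hdp]
      rw [ihd _ hrest]
      simp [pv_update_update, List.append_assoc]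
  
-- B's fuelled stack loop equals the canonical run when the fuel is large enough
theorem pvB1 (g : PySem.Dict String (List String)) (pool : List String)
    (hpool : ∀ n : String, ∀ x ∈ PySem.Dict.getD g n [], x ∈ pool) (f : Nat) :
    ∀ (stack : List (String × String × Bool × Bool)) (v : PySem.Set String),
      (∀ fr ∈ stack, fr.2.2.2 = false ∧ fr.1 ∈ pool) → pvU pool v + 1 ≤ f →
      pvRunB g f stack v = pvFlat g pool stack v := by
  induction f with
  | zero => exact fun _ _ _ h => absurd h (by omega)
  | succ f ih =>
    intro stack
    induction stack with
    | nil => intro v _ _; rw [pvRunB, pvFlat]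
    | cons fr rest ihs =>
      intro v hfr hf
      obtain ⟨name, pre, isLast, force⟩ := fr
      have hhd := hfr _ List.mem_cons_self
      have hforce : force = false := hhd.1
      have hname : name ∈ pool := hhd.2
      have hrest : ∀ fr ∈ rest, fr.2.2.2 = false ∧ fr.1 ∈ pool :=
        fun x hx => hfr x (List.mem_cons_of_mem _ hx)
      subst hforce
      by_cases hc : PySem.Set.contains v name = true
      · rw [pvRunB, pvFlat]
        simp only [hc, Bool.not_false, Bool.true_and, if_pos]
        rw [ihs v hrest hf]
      · rw [pvRunB, pvFlat]
        simp only [hc, Bool.not_false, Bool.true_and, if_neg, Bool.false_eq_true]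
        have hlt := pvU_add_lt pool v name hname hc
        have hmk : ∀ fr ∈ pvMkFrames (PySem.Dict.getD g name [])
            (pre ++ (if isLast then "    " else "│   ")) ++ rest, fr.2.2.2 = false ∧ fr.1 ∈ pool := by
          intro x hx
          rcases List.mem_append.mp hx with h1 | h2
          · constructor
            · clear hx; revert h1
              generalize (PySem.Dict.getD g name []) = ds
              generalize (pre ++ (if isLast then "    " else "│   ")) = cps
              induction ds with
              | nil => intro h; simp [pvMkFrames] at h
              | cons a t iha =>
                intro h
                rw [pvMkFrames] at h
                rcases List.mem_cons.mp h with rfl | h2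
                · rfl
                · exact iha h2
            · have : x.1 ∈ PySem.Dict.getD g name [] := by
                clear hx
                revert h1
                generalize (PySem.Dict.getD g name []) = ds
                generalize (pre ++ (if isLast then "    " else "│   ")) = cps
                induction ds with
                | nil => intro h; simp [pvMkFrames] at h
                | cons a t iha =>
                  intro h
                  rw [pvMkFrames] at h
                  rcases List.mem_cons.mp h with rfl | h2
                  · exact List.mem_cons_self
                  · exact List.mem_cons_of_mem _ (iha h2)
              exact hpool name x.1 this
          · exact hrest x h2
        rw [ih _ _ hmk (by omega)]
        rw [pvLapp g pool _ _ rest (PySem.Set.add v name) (fun x hx => hpool name x hx)]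
        rw [pvTreeC]
        simp only [dif_pos (And.intro hname hc)]
        rfl


-- propagation of the root invariants past one processed root
theorem pvNextHyps (g : PySem.Dict String (List String)) (pool : List String)
    (r : String) (rest : List String) (v : PySem.Set String)
    (hnd : (r :: rest).Nodup)
    (hv : ∀ x ∈ r :: rest, ¬ PySem.Set.contains v x = true)
    (h3 : ∀ x ∈ r :: rest, (r :: rest).length = 1 ∨ x ∉ g.values.flatten) :
    (∀ x ∈ rest, ¬ PySem.Set.contains
        (PySem.Set.update v (pvTreeC g pool r "" rest.isEmpty v).2) x = true) ∧
    (∀ x ∈ rest, rest.length = 1 ∨ x ∉ g.values.flatten) := by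
  have hflat : ∀ x ∈ rest, x ∉ g.values.flatten := by
    intro x hx
    rcases h3 x (List.mem_cons_of_mem _ hx) with h1 | h2
    · exfalso
      have hre : rest = [] := by simpa using h1
      subst hre; simp at hx
    · exact h2
  refine ⟨?_, fun x hx => Or.inr (hflat x hx)⟩
  intro x hx
  rw [pv_contains_update]
  have hvx := hv x (List.mem_cons_of_mem _ hx)
  simp only [Bool.or_eq_true, not_or]
  refine ⟨hvx, ?_⟩
  intro hcx
  have hmem : x ∈ (pvTreeC g pool r "" rest.isEmpty v).2 := by simpa using hcx
  rcases pvGB_tree g pool r "" rest.isEmpty v x hmem with rfl | hf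
  · exact (List.nodup_cons.mp hnd).1 hx
  · exact hflat x hx hf

theorem pvRootsA_eq (g : PySem.Dict String (List String)) (pool : List String)
    (hpool : ∀ n : String, ∀ x ∈ PySem.Dict.getD g n [], x ∈ pool) (f : Nat)
    (hf : pool.length ≤ f) :
    ∀ (rs : List String) (v : PySem.Set String) (isFirst : Bool),
      rs.Nodup → (∀ r ∈ rs, r ∈ pool) → (∀ r ∈ rs, ¬ PySem.Set.contains v r = true) →
      (∀ r ∈ rs, rs.length = 1 ∨ r ∉ g.values.flatten) →
      pvRootsA g (f + 1) rs isFirst v = pvRootsC g pool rs isFirst v := by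
  intro rs
  induction rs with
  | nil => intro v isFirst _ _ _ _; rw [pvRootsA, pvRootsC]
  | cons r rest ih =>
    intro v isFirst hnd hmem hv h3
    have hr : r ∈ pool := hmem r List.mem_cons_self
    have hvr : ¬ PySem.Set.contains v r = true := hv r List.mem_cons_self
    have hfuel : pvU pool v + 1 ≤ f + 1 := by have := pvU_le_len pool v; omega
    have ht := (pvA1 g pool hpool (f + 1)).1 r "" rest.isEmpty v hr hvr hfuel
    obtain ⟨hnext, h3'⟩ := pvNextHyps g pool r rest v hnd hv h3
    rw [pvRootsA, pvRootsC, ht,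
      ih _ false (List.nodup_cons.mp hnd).2 (fun x hx => hmem x (List.mem_cons_of_mem _ hx))
        hnext h3']

theorem pvRootsB_eq (g : PySem.Dict String (List String)) (pool : List String)
    (hpool : ∀ n : String, ∀ x ∈ PySem.Dict.getD g n [], x ∈ pool) (f : Nat)
    (hf : pool.length ≤ f) :
    ∀ (rs : List String) (v : PySem.Set String) (isFirst : Bool),
      rs.Nodup → (∀ r ∈ rs, r ∈ pool) → (∀ r ∈ rs, ¬ PySem.Set.contains v r = true) →
      (∀ r ∈ rs, rs.length = 1 ∨ r ∉ g.values.flatten) →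
      pvRootsB g (f + 1) rs isFirst v = pvRootsC g pool rs isFirst v := by
  intro rs
  induction rs with
  | nil => intro v isFirst _ _ _ _; rw [pvRootsB, pvRootsC]
  | cons r rest ih =>
    intro v isFirst hnd hmem hv h3
    have hr : r ∈ pool := hmem r List.mem_cons_self
    have hvr : ¬ PySem.Set.contains v r = true := hv r List.mem_cons_self
    have hlt := pvU_add_lt pool v r hr hvr
    have hfuel : pvU pool (PySem.Set.add v r) + 1 ≤ f := by
      have := pvU_le_len pool v; omega
    -- unfold the run of the single forced root frame
    have hrun : pvRunB g (f + 1) [(r, "", rest.isEmpty, true)] v =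
        ((pvTreeC g pool r "" rest.isEmpty v).1,
         PySem.Set.update v (pvTreeC g pool r "" rest.isEmpty v).2) := by
      rw [pvRunB]
      simp only [Bool.not_true, Bool.false_and, Bool.false_eq_true, if_false]
      rw [pvB1 g pool hpool f _ _ ?frames hfuel]
      case frames =>
        intro fr hfr
        rw [List.append_nil] at hfr
        constructor
        · revert hfr
          generalize (PySem.Dict.getD g r []) = ds
          generalize ("" ++ (if rest.isEmpty then "    " else "│   ") : String) = cps
          induction ds with
          | nil => intro h; simp [pvMkFrames] at h
          | cons a t iha =>
            intro h
            rw [pvMkFrames] at h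
            rcases List.mem_cons.mp h with rfl | h2
            · rfl
            · exact iha h2
        · have hin : fr.1 ∈ PySem.Dict.getD g r [] := by
            revert hfr
            generalize (PySem.Dict.getD g r []) = ds
            generalize ("" ++ (if rest.isEmpty then "    " else "│   ") : String) = cps
            induction ds with
            | nil => intro h; simp [pvMkFrames] at h
            | cons a t iha =>
              intro h
              rw [pvMkFrames] at h
              rcases List.mem_cons.mp h with rfl | h2
              · exact List.mem_cons_self
              · exact List.mem_cons_of_mem _ (iha h2)
          exact hpool r fr.1 hin
      rw [pvLapp g pool _ _ [] (PySem.Set.add v r) (fun x hx => hpool r x hx)]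
      rw [pvTreeC]
      simp only [dif_pos (And.intro hr hvr)]
      rw [pvFlat]
      simp only [List.append_nil]
      rfl
    obtain ⟨hnext, h3'⟩ := pvNextHyps g pool r rest v hnd hv h3
    rw [pvRootsB, pvRootsC, hrun,
      ih _ false (List.nodup_cons.mp hnd).2 (fun x hx => hmem x (List.mem_cons_of_mem _ hx))
        hnext h3']

-- ===== VERDICT (by name: the statement is the Claim_ definition above) =====
theorem pv_contains_ofList (xs : List String) (x : String) :
    PySem.Set.contains (PySem.Set.ofList xs) x = xs.contains x := by
  have h : PySem.Set.ofList xs = PySem.Set.update [] xs := rfl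
  rw [h, pv_contains_update]
  simp [PySem.Set.contains]

theorem format_import_graph_spec : Claim_equal_format_import_graph := by
  intro graph _
  unfold Spec_format_import_graph
  rw [format_import_graph, format_import_graph_alt]
  by_cases hsz : (PySem.Dict.ofList graph).size = 0
  · simp only [hsz, if_pos]
  · simp only [hsz, if_neg, Bool.false_eq_true, not_false_eq_true]
    have hset : (PySem.Dict.ofList graph).values.foldl
        (fun s deps => PySem.Set.update s deps) PySem.Set.empty =
        PySem.Set.ofList (PySem.Dict.ofList graph).values.flatten := by
      rw [PySem.Set.ofList_eq_foldl, List.foldl_flatten]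
      rfl
    rw [hset]
    set g := PySem.Dict.ofList graph with hgdef
    set pool : List String := g.keys ++ g.values.flatten with hpooldef
    have hpool : ∀ n : String, ∀ x ∈ PySem.Dict.getD g n [], x ∈ pool :=
      fun n x hx => List.mem_append_right _ (pv_getD_sub g n x hx)
    have hlen : pool.length = g.size + (g.values.map List.length).sum := by
      rw [hpooldef]
      simp [List.length_flatten, PySem.Dict.keys, PySem.Dict.size, PySem.Dict.values]
    have hkn : g.keys.Nodup := PySem.Dict.nodup_keys_ofList graph
    set roots0 : List String :=
      g.keys.filter (fun f => !PySem.Set.contains (PySem.Set.ofList g.values.flatten) f)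
      with hroots0
    set roots : List String := if roots0.isEmpty then g.keys.take 1 else roots0 with hroots
    have hnd : roots.Nodup := by
      rw [hroots]
      split
      · exact hkn.sublist (List.take_sublist _ _)
      · exact hkn.filter _
    have hmem : ∀ r ∈ roots, r ∈ pool := by
      intro r hr
      rw [hroots] at hr
      refine List.mem_append_left _ ?_
      rcases Bool.eq_false_or_eq_true roots0.isEmpty with he | he
      · rw [he] at hr; simp at hr
        exact (List.take_sublist _ _).subset hr
      · rw [he] at hr; simp at hr
        exact List.mem_of_mem_filter hr
    have hv0 : ∀ r ∈ roots, ¬ PySem.Set.contains PySem.Set.empty r = true := by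
      intro r _
      simp [PySem.Set.contains, PySem.Set.empty]
    have h3 : ∀ r ∈ roots, roots.length = 1 ∨ r ∉ g.values.flatten := by
      intro r hr
      rcases Bool.eq_false_or_eq_true roots0.isEmpty with he | he
      · left
        rw [hroots, he] at hr ⊢
        simp at hr ⊢
        have hkne : g.keys ≠ [] := by
          intro hke
          have : g.size = 0 := by
            have := congrArg List.length hke
            simpa [PySem.Dict.keys, PySem.Dict.size] using this
          exact hsz this
        have h1 : 1 ≤ g.keys.length := List.length_pos_iff.mpr hkne
        omega
      · right
        rw [hroots, he] at hr
        simp at hr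
        have := (List.mem_filter.mp hr).2
        rw [pv_contains_ofList] at this
        simp only [Bool.not_eq_true', List.contains_eq_mem, decide_eq_false_iff_not] at this
        exact this
    have hfle : pool.length ≤ g.size + (g.values.map List.length).sum := le_of_eq hlen
    rw [pvRootsA_eq g pool hpool _ hfle roots PySem.Set.empty true hnd hmem hv0 h3,
        pvRootsB_eq g pool hpool _ hfle roots PySem.Set.empty true hnd hmem hv0 h3]
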